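-- pv_equiv track=rewrite | github.com/lvainio/advent-of-code | old/2023/18/main.py | count_inside_points
-- ===== SOURCE A (Python) =====
-- def flood_fill(grid, row, col):
--     if grid[row][col] != '.':
--         return
--
--     num_rows = len(grid)
--     num_cols = len(grid[0])
--
--     stack = [(row, col)]
--     while stack:
--         row, col = stack.pop()
--
--         if not (0 <= row < num_rows) or not (0 <= col < num_cols) or grid[row][col] != '.':
--             continue
--
--         grid[row][col] = 'O'
--
--         stack.append((row - 1, col))
--         stack.append((row + 1, col))
--         stack.append((row, col - 1))
--         stack.append((row, col + 1))
--
-- def count_inside_points(grid):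
--     num_rows = len(grid)
--     num_cols = len(grid[0])
--
--     for row in range(num_rows):
--         if grid[row][0] == '.':
--             flood_fill(grid, row, 0)
--
--         if grid[row][num_cols-1] == '.':
--             flood_fill(grid, row, num_cols-1)
--
--     for col in range(num_cols):
--         if grid[0][col] == '.':
--             flood_fill(grid, 0, col)
--
--         if grid[num_rows-1][col] == '.':
--             flood_fill(grid, num_rows-1, col)
--
--     count = 0
--     for row in grid:
--         count += row.count('O')
--     return num_rows*num_cols - count
-- ===== SOURCE B (Python) =====
-- def count_inside_points(grid):
--     num_rows = len(grid)
--     num_cols = len(grid[0])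
--
--     def dot(r, c):
--         return 0 <= r < num_rows and 0 <= c < num_cols and grid[r][c] == '.'
--
--     outside = set()
--     for r in range(num_rows):
--         for c in (0, num_cols - 1):
--             if dot(r, c):
--                 outside.add((r, c))
--     for c in range(num_cols):
--         for r in (0, num_rows - 1):
--             if dot(r, c):
--                 outside.add((r, c))
--
--     frontier = outside
--     while frontier:
--         frontier = {(nr, nc)
--                     for (r, c) in frontier
--                     for (nr, nc) in ((r - 1, c), (r + 1, c), (r, c - 1), (r, c + 1))
--                     if dot(nr, nc) and (nr, nc) not in outside}
--         outside |= frontier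
--
--     for (r, c) in outside:
--         grid[r][c] = 'O'
--
--     return num_rows * num_cols - sum(row.count('O') for row in grid)
-- ===== Notes on version B (the rewrite author's own statement) =====
-- stated objective: alternative
-- what changed: A runs a separate stack-based DFS flood fill from each border '.' cell, mutating the grid as it goes; B collects all border '.' cells into one set and grows it to the fixpoint by level-by-level BFS frontier expansion over an immutable grid, marking and counting once at the end.
import Mathlib
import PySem

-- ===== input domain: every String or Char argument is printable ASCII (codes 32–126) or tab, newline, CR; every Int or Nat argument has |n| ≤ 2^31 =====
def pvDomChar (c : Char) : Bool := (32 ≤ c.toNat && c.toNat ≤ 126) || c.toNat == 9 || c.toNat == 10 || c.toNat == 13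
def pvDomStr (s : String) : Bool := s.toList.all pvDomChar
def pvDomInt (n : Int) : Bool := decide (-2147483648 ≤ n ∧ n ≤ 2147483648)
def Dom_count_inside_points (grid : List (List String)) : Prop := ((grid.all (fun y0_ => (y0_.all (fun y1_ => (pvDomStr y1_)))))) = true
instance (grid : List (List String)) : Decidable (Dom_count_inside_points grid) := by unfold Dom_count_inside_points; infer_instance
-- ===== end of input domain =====

-- B replaces A's per-seed DFS flood fills (explicit stack, one fill per border seed) by a single
-- level-by-level BFS from the set of all border '.' cells; same return value, and both perform the
-- same in-place marking in Python (the Lean ports are pure, so the theorems are about the return value).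

-- ===== PORT A =====

def cellD (g : List (List String)) (r c : Int) : String :=
  (g.getD r.toNat []).getD c.toNat ""

def setCell (g : List (List String)) (r c : Int) : List (List String) :=
  g.set r.toNat ((g.getD r.toNat []).set c.toNat "O")

def dotCnt (g : List (List String)) : Nat :=
  (g.map (fun row => row.count ".")).sum

theorem getD_ne_default {α : Type} [Inhabited α] (l : List α) (i : Nat) (d : α)
    (h : l.getD i d ≠ d) : i < l.length := by
  by_contra hn
  exact h (List.getD_eq_default l d (by omega))

theorem count_set_lt (row : List String) (j : Nat) (hj : j < row.length)
    (h : row.getD j "" = ".") : (row.set j "O").count "." < row.count "." := by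
  induction row generalizing j with
  | nil => simp at hj
  | cons a l ih =>
    cases j with
    | zero =>
      have ha : a = "." := by simpa using h
      simp [List.set_cons_zero, ha]
    | succ j =>
      have := ih j (by simpa using hj) (by simpa using h)
      simp [List.set_cons_succ, List.count_cons]
      omega

theorem sum_map_set_lt (g : List (List String)) (i : Nat) (row' : List String)
    (hi : i < g.length) (hlt : row'.count "." < (g.getD i []).count ".") :
    dotCnt (g.set i row') < dotCnt g := by
  induction g generalizing i with
  | nil => simp at hi
  | cons a l ih =>
    cases i with
    | zero => simp_all [dotCnt]
    | succ i =>
      have := ih i (by simpa using hi) (by simpa using hlt)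
      simp_all [dotCnt]

theorem dotCnt_setCell_lt (g : List (List String)) (r c : Int)
    (h : cellD g r c = ".") : dotCnt (setCell g r c) < dotCnt g := by
  unfold cellD at h
  have hr : r.toNat < g.length := by
    apply getD_ne_default (d := ([] : List String))
    intro hg
    rw [hg] at h
    simp at h
  have hc : c.toNat < (g.getD r.toNat []).length :=
    getD_ne_default _ _ "" (by rw [h]; decide)
  exact sum_map_set_lt g r.toNat _ hr (count_set_lt _ _ hc h)

def floodLoop (R C : Nat) (g : List (List String)) (stack : List (Int × Int)) :
    List (List String) :=
  match stack with
  | [] => g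
  | (row, col) :: rest =>
    if h : ¬(0 ≤ row ∧ row < (R : Int)) ∨ ¬(0 ≤ col ∧ col < (C : Int)) ∨ cellD g row col ≠ "." then
      floodLoop R C g rest
    else
      floodLoop R C (setCell g row col)
        ((row, col + 1) :: (row, col - 1) :: (row + 1, col) :: (row - 1, col) :: rest)
termination_by (dotCnt g, stack.length)
decreasing_by
  · exact Prod.Lex.right _ (by simp)
  · push Not at h
    exact Prod.Lex.left _ _ (dotCnt_setCell_lt g row col h.2.2)

def flood_fill (R C : Nat) (g : List (List String)) (row col : Int) :
    List (List String) :=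
  if cellD g row col ≠ "." then g
  else floodLoop R C g [(row, col)]

def count_inside_points (grid : List (List String)) : Int :=
  let R := grid.length
  let C := (grid.headD []).length
  let g1 := (List.range R).foldl (fun g row =>
    let g' := if cellD g (↑row) 0 = "." then flood_fill R C g (↑row) 0 else g
    if cellD g' (↑row) ((C : Int) - 1) = "." then flood_fill R C g' (↑row) ((C : Int) - 1) else g') grid
  let g2 := (List.range C).foldl (fun g col =>
    let g' := if cellD g 0 (↑col) = "." then flood_fill R C g 0 (↑col) else g
    if cellD g' ((R : Int) - 1) (↑col) = "." then flood_fill R C g' ((R : Int) - 1) (↑col) else g') g1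
  (R * C : Int) - (g2.map (fun row => (row.count "O" : Int))).sum

def nbrsOf (p : Int × Int) : List (Int × Int) :=
  [(p.1 - 1, p.2), (p.1 + 1, p.2), (p.1, p.2 - 1), (p.1, p.2 + 1)]

def dotB (grid : List (List String)) (R C : Nat) (p : Int × Int) : Bool :=
  decide (0 ≤ p.1) && decide (p.1 < (R : Int)) && decide (0 ≤ p.2) && decide (p.2 < (C : Int))
    && decide (cellD grid p.1 p.2 = ".")

def rect (R C : Nat) : List (Int × Int) :=
  (List.range R).flatMap (fun r => (List.range C).map (fun c => (Int.ofNat r, Int.ofNat c)))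

def uncov (grid : List (List String)) (R C : Nat) (o : List (Int × Int)) : Nat :=
  (rect R C).countP (fun p => dotB grid R C p && !(PySem.Set.contains o p))

theorem uncov_lt (grid : List (List String)) (R C : Nat) (o u : List (Int × Int))
    (q : Int × Int) (hq : dotB grid R C q = true) (hqo : q ∉ o) (hqu : q ∈ u)
    (hsub : ∀ x ∈ o, x ∈ u) : uncov grid R C u < uncov grid R C o := by
  obtain ⟨a, b⟩ := q
  simp only [dotB, Bool.and_eq_true, decide_eq_true_eq] at hq
  obtain ⟨⟨⟨⟨h1, h2⟩, h3⟩, h4⟩, h5⟩ := hq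
  unfold uncov
  have hmem : ((a, b) : Int × Int) ∈ rect R C := by
    have ha : a.toNat ∈ List.range R := List.mem_range.mpr (by omega)
    have hb : b.toNat ∈ List.range C := List.mem_range.mpr (by omega)
    unfold rect
    refine List.mem_flatMap.mpr ⟨a.toNat, ha, List.mem_map.mpr ⟨b.toNat, hb, ?_⟩⟩
    simp only [Prod.mk.injEq, Int.ofNat_eq_natCast]
    constructor <;> omega
  obtain ⟨l₁, l₂, hsplit⟩ := List.mem_iff_append.mp hmem
  rw [hsplit]
  simp only [List.countP_append, List.countP_cons]
  have mono : ∀ l : List (Int × Int),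
      l.countP (fun p => dotB grid R C p && !(PySem.Set.contains u p)) ≤
      l.countP (fun p => dotB grid R C p && !(PySem.Set.contains o p)) := by
    intro l
    apply List.countP_mono_left
    intro x _ hx
    simp only [Bool.and_eq_true, Bool.not_eq_true'] at hx ⊢
    refine ⟨hx.1, ?_⟩
    rcases hco : PySem.Set.contains o x with _ | _
    · rfl
    · have hcu := (PySem.Set.contains_iff u x).mpr (hsub x ((PySem.Set.contains_iff o x).mp hco))
      rw [hx.2] at hcu
      simp at hcu
  have hnew : (dotB grid R C (a, b) && !(PySem.Set.contains u (a, b))) = false := by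
    simp only [(PySem.Set.contains_iff u (a, b)).mpr hqu, Bool.not_true, Bool.and_false]
  have hold : (dotB grid R C (a, b) && !(PySem.Set.contains o (a, b))) = true := by
    have hof : PySem.Set.contains o (a, b) = false := by
      rcases hco : PySem.Set.contains o (a, b) with _ | _
      · rfl
      · exact absurd ((PySem.Set.contains_iff o (a, b)).mp hco) hqo
    simp only [hof, Bool.not_false, Bool.and_true, dotB, Bool.and_eq_true, decide_eq_true_eq]
    exact ⟨⟨⟨⟨h1, h2⟩, h3⟩, h4⟩, h5⟩
  rw [hnew, hold]
  have m1 := mono l₁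
  have m2 := mono l₂
  simp only [Bool.false_eq_true, if_false, if_true]
  omega

def newFrontier (grid : List (List String)) (R C : Nat)
    (outside frontier : PySem.Set (Int × Int)) : PySem.Set (Int × Int) :=
  PySem.Set.ofList ((frontier.flatMap nbrsOf).filter
    (fun q => dotB grid R C q && !(PySem.Set.contains outside q)))

def bfsLoop (grid : List (List String)) (R C : Nat)
    (outside frontier : PySem.Set (Int × Int)) : PySem.Set (Int × Int) :=
  if _hf : frontier = [] then outside
  else bfsLoop grid R C
    (PySem.Set.union outside (newFrontier grid R C outside frontier))
    (newFrontier grid R C outside frontier)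
termination_by (uncov grid R C outside, frontier.length)
decreasing_by
  rcases hfe : newFrontier grid R C outside frontier with _ | ⟨q, l⟩
  · have hu : PySem.Set.union outside ([] : List (Int × Int)) = outside := rfl
    rw [hu]
    exact Prod.Lex.right _ (by simp [List.length_pos_iff, _hf])
  · apply Prod.Lex.left
    have hq : q ∈ newFrontier grid R C outside frontier := by
      rw [hfe]; exact List.mem_cons_self
    have hq' : q ∈ (frontier.flatMap nbrsOf).filter
        (fun q => dotB grid R C q && !(PySem.Set.contains outside q)) :=
      (PySem.Set.mem_ofList _ _).mp hq
    have hqf := List.of_mem_filter hq'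
    simp only [Bool.and_eq_true, Bool.not_eq_true'] at hqf
    apply uncov_lt grid R C outside _ q hqf.1
    · intro hin
      rw [(PySem.Set.contains_iff outside q).mpr hin] at hqf
      simp at hqf
    · exact (PySem.Set.mem_union _ _ _).mpr (Or.inr List.mem_cons_self)
    · intro x hx
      exact (PySem.Set.mem_union _ _ _).mpr (Or.inl hx)

def count_inside_points_alt (grid : List (List String)) : Int :=
  let R := grid.length
  let C := (grid.headD []).length
  let seeds1 : PySem.Set (Int × Int) := (List.range R).foldl (fun s r =>
    [(0 : Int), (C : Int) - 1].foldl (fun s c =>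
      if dotB grid R C (↑r, c) then PySem.Set.add s (↑r, c) else s) s)
    PySem.Set.empty
  let seeds : PySem.Set (Int × Int) := (List.range C).foldl (fun s c =>
    [(0 : Int), (R : Int) - 1].foldl (fun s r =>
      if dotB grid R C (r, ↑c) then PySem.Set.add s (r, ↑c) else s) s)
    seeds1
  let outside := bfsLoop grid R C seeds seeds
  let g' := outside.foldl (fun g p => setCell g p.1 p.2) grid
  (R * C : Int) - (g'.map (fun row => (row.count "O" : Int))).sum

-- ===== PRECONDITION & SPEC =====
-- Pre_ is exactly the set of inputs on which the Python A returns normally: A raises IndexError on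
-- an empty grid, an empty first row, or any row shorter than the first row (it indexes every row at
-- columns 0 and len(grid[0])-1).
def Pre_count_inside_points (grid : List (List String)) : Prop :=
  grid ≠ [] ∧ 0 < (grid.headD []).length ∧ ∀ row ∈ grid, (grid.headD []).length ≤ row.length

instance (grid : List (List String)) : Decidable (Pre_count_inside_points grid) := by
  unfold Pre_count_inside_points; infer_instance

def pvWitness_count_inside_points : List (List String) :=
  [[".", "#", "."], ["#", ".", "#"], [".", "#", "."]]

def Spec_count_inside_points (grid : List (List String)) (out : Int) : Prop := out = count_inside_points_alt grid
instance (grid : List (List String)) (out : Int) : Decidable (Spec_count_inside_points grid out) := by unfold Spec_count_inside_points; infer_instance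

-- ===== CLAIM (what is proved, stated in full; the proofs are below) =====
def Claim_equal_count_inside_points : Prop := ∀ (grid : List (List String)), Dom_count_inside_points grid → Pre_count_inside_points grid → Spec_count_inside_points grid (count_inside_points grid)

-- ===== LEMMAS AND PROOFS =====


def Adj (p q : Int × Int) : Prop := q ∈ nbrsOf p

inductive ReachN (D : Int × Int → Prop) : Nat → Int × Int → Int × Int → Prop
  | refl (p : Int × Int) : D p → ReachN D 0 p p
  | head {n : Nat} (p q r : Int × Int) : D p → Adj p q → ReachN D n q r → ReachN D (n + 1) p r

def Reach (D : Int × Int → Prop) (p q : Int × Int) : Prop := ∃ n, ReachN D n p q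

def RA (D : Int × Int → Prop) (S : List (Int × Int)) (q : Int × Int) : Prop :=
  ∃ p ∈ S, Reach D p q

theorem reachN_src {D : Int × Int → Prop} {n : Nat} {p q : Int × Int}
    (h : ReachN D n p q) : D p := by cases h <;> assumption

theorem reachN_tgt {D : Int × Int → Prop} {n : Nat} {p q : Int × Int}
    (h : ReachN D n p q) : D q := by
  induction h with
  | refl _ h => exact h
  | head _ _ _ _ _ _ ih => exact ih

theorem reachN_mono {D D' : Int × Int → Prop} (hDD : ∀ x, D x → D' x) {n : Nat}
    {p q : Int × Int} (h : ReachN D n p q) : ReachN D' n p q := by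
  induction h with
  | refl _ h => exact ReachN.refl _ (hDD _ h)
  | head p q r hD hA _ ih => exact ReachN.head p q r (hDD _ hD) hA ih

theorem reachN_congr {D D' : Int × Int → Prop} (hDD : ∀ x, D x ↔ D' x) {n : Nat}
    {p q : Int × Int} : ReachN D n p q ↔ ReachN D' n p q :=
  ⟨reachN_mono (fun x => (hDD x).mp), reachN_mono (fun x => (hDD x).mpr)⟩

theorem RA_congr {D D' : Int × Int → Prop} (hDD : ∀ x, D x ↔ D' x) {S : List (Int × Int)}
    {q : Int × Int} : RA D S q ↔ RA D' S q := by
  unfold RA Reach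
  constructor
  · rintro ⟨p, hp, n, hr⟩; exact ⟨p, hp, n, (reachN_congr hDD).mp hr⟩
  · rintro ⟨p, hp, n, hr⟩; exact ⟨p, hp, n, (reachN_congr hDD).mpr hr⟩

theorem reachN_snoc {D : Int × Int → Prop} {n : Nat} {p q x : Int × Int}
    (h : ReachN D n p q) (hA : Adj q x) (hD : D x) : ReachN D (n + 1) p x := by
  induction h with
  | refl p hp => exact ReachN.head p x x hp hA (ReachN.refl x hD)
  | head p q r hDp hAd _ ih => exact ReachN.head p q x hDp hAd (ih hA)

-- split around an excluded point p: a D-path from x ≠ p either avoids p or reaches q from p in fewer steps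
theorem reachN_split {D : Int × Int → Prop} (p : Int × Int) : ∀ {n : Nat} {x q : Int × Int},
    ReachN D n x q → x ≠ p →
    ReachN (fun y => D y ∧ y ≠ p) n x q ∨ ∃ k, k < n ∧ ReachN D k p q := by
  intro n
  induction n with
  | zero =>
    intro x q h hxp
    cases h with
    | refl _ hD => exact Or.inl (ReachN.refl _ ⟨hD, hxp⟩)
  | succ n ih =>
    intro x q h hxp
    cases h with
    | head _ y _ hD hA htail =>
      by_cases hyp : y = p
      · exact Or.inr ⟨n, Nat.lt_succ_self n, hyp ▸ htail⟩
      · rcases ih htail hyp with h' | ⟨k, hk, hk'⟩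
        · exact Or.inl (ReachN.head _ _ _ ⟨hD, hxp⟩ hA h')
        · exact Or.inr ⟨k, Nat.lt_succ_of_lt hk, hk'⟩

-- last-occurrence decomposition: a D-path from p to q is trivial or leaves p one last time
theorem reachN_lo {D : Int × Int → Prop} (p : Int × Int) : ∀ n : Nat, ∀ {q : Int × Int},
    ReachN D n p q → q = p ∨ ∃ m, Adj p m ∧ Reach (fun y => D y ∧ y ≠ p) m q := by
  intro n
  induction n using Nat.strong_induction_on with
  | _ n ih =>
    intro q h
    cases h with
    | refl _ _ => exact Or.inl rfl
    | @head n' _ y _ hD hA htail =>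
      by_cases hyp : y = p
      · exact ih n' (Nat.lt_succ_self n') (hyp ▸ htail)
      · rcases reachN_split p htail hyp with h' | ⟨k, hk, hk'⟩
        · exact Or.inr ⟨y, hA, n', h'⟩
        · exact ih k (Nat.lt_succ_of_lt hk) hk'

theorem reach_closed {D M : Int × Int → Prop}
    (hcl : ∀ a b, M a → Adj a b → D b → M b) {n : Nat} {s q : Int × Int}
    (h : ReachN D n s q) (hs : M s) : M q := by
  induction h with
  | refl _ _ => exact hs
  | head p y r hD hA htail ih => exact ih (hcl p y hs hA (reachN_src htail))

theorem reach_hit {D M : Int × Int → Prop}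
    (hcl : ∀ a b, M a → Adj a b → D b → M b) : ∀ {n : Nat} {s q : Int × Int},
    ReachN D n s q → M q ∨ ReachN (fun y => D y ∧ ¬ M y) n s q := by
  intro n
  induction n with
  | zero =>
    intro s q h
    cases h with
    | refl _ hD =>
      by_cases hM : M s
      · exact Or.inl hM
      · exact Or.inr (ReachN.refl _ ⟨hD, hM⟩)
  | succ n ih =>
    intro s q h
    cases h with
    | head _ y _ hD hA htail =>
      by_cases hM : M s
      · exact Or.inl (reach_closed hcl htail (hcl _ _ hM hA (reachN_src htail)))
      · rcases ih htail with hq | h'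
        · exact Or.inl hq
        · exact Or.inr (ReachN.head _ _ _ ⟨hD, hM⟩ hA h')

theorem mark_step {D : Int × Int → Prop} {p₀ : Int × Int} (hD : D p₀)
    (rest : List (Int × Int)) (q : Int × Int) :
    (q = p₀ ∨ RA (fun y => D y ∧ y ≠ p₀) (nbrsOf p₀ ++ rest) q) ↔ RA D (p₀ :: rest) q := by
  constructor
  · rintro (rfl | ⟨s, hs, k, hr⟩)
    · exact ⟨q, List.mem_cons_self, 0, ReachN.refl q hD⟩
    · rcases List.mem_append.mp hs with hnb | hrest
      · exact ⟨p₀, List.mem_cons_self, k + 1,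
          ReachN.head p₀ s q hD hnb (reachN_mono (fun x hx => hx.1) hr)⟩
      · exact ⟨s, List.mem_cons_of_mem _ hrest, k, reachN_mono (fun x hx => hx.1) hr⟩
  · rintro ⟨s, hs, k, hr⟩
    by_cases hsp : s = p₀
    · subst hsp
      rcases reachN_lo s k hr with rfl | ⟨m, hA, k', hr'⟩
      · exact Or.inl rfl
      · exact Or.inr ⟨m, List.mem_append.mpr (Or.inl hA), k', hr'⟩
    · have hrest : s ∈ rest := (List.mem_cons.mp hs).resolve_left hsp
      rcases reachN_split p₀ hr hsp with hr' | ⟨k', _, hr'⟩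
      · exact Or.inr ⟨s, List.mem_append.mpr (Or.inr hrest), k, hr'⟩
      · rcases reachN_lo p₀ k' hr' with rfl | ⟨m, hA, k'', hr''⟩
        · exact Or.inl rfl
        · exact Or.inr ⟨m, List.mem_append.mpr (Or.inl hA), k'', hr''⟩

theorem RA_cons_of_notD {D : Int × Int → Prop} {p₀ : Int × Int} (hD : ¬ D p₀)
    (rest : List (Int × Int)) (q : Int × Int) : RA D (p₀ :: rest) q ↔ RA D rest q := by
  constructor
  · rintro ⟨s, hs, k, hr⟩
    rcases List.mem_cons.mp hs with rfl | hrest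
    · exact absurd (reachN_src hr) hD
    · exact ⟨s, hrest, k, hr⟩
  · rintro ⟨s, hs, k, hr⟩
    exact ⟨s, List.mem_cons_of_mem _ hs, k, hr⟩

theorem RA_append_singleton {D : Int × Int → Prop} {S : List (Int × Int)} {s q : Int × Int} :
    RA D (S ++ [s]) q ↔ RA D S q ∨ Reach D s q := by
  unfold RA
  constructor
  · rintro ⟨p, hp, hr⟩
    rcases List.mem_append.mp hp with h | h
    · exact Or.inl ⟨p, h, hr⟩
    · rcases List.mem_singleton.mp h with rfl
      exact Or.inr hr
  · rintro (⟨p, hp, hr⟩ | hr)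
    · exact ⟨p, List.mem_append.mpr (Or.inl hp), hr⟩
    · exact ⟨s, List.mem_append.mpr (Or.inr (List.mem_singleton_self s)), hr⟩

theorem absorb {D M : Int × Int → Prop}
    (hcl : ∀ a b, M a → Adj a b → D b → M b) (s q : Int × Int) :
    (M q ∨ Reach (fun y => D y ∧ ¬ M y) s q) ↔ (M q ∨ Reach D s q) := by
  constructor
  · rintro (h | ⟨n, hr⟩)
    · exact Or.inl h
    · exact Or.inr ⟨n, reachN_mono (fun x hx => hx.1) hr⟩
  · rintro (h | ⟨n, hr⟩)
    · exact Or.inl h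
    · rcases reach_hit hcl hr with h | h
      · exact Or.inl h
      · exact Or.inr ⟨n, h⟩


-- ----- grid layer -----

def Dot (g0 : List (List String)) (R C : Nat) (p : Int × Int) : Prop :=
  0 ≤ p.1 ∧ p.1 < (R : Int) ∧ 0 ≤ p.2 ∧ p.2 < (C : Int) ∧ cellD g0 p.1 p.2 = "."

theorem dotB_iff (g0 : List (List String)) (R C : Nat) (p : Int × Int) :
    dotB g0 R C p = true ↔ Dot g0 R C p := by
  simp [dotB, Dot, and_assoc]

def Mk (g0 g : List (List String)) (R C : Nat) (p : Int × Int) : Prop :=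
  Dot g0 R C p ∧ cellD g p.1 p.2 = "O"

def Shape (g0 g : List (List String)) (R C : Nat) : Prop :=
  g.length = g0.length ∧
  (∀ i : Nat, (g.getD i []).length = (g0.getD i []).length) ∧
  (∀ r c : Nat, cellD g (r : Int) (c : Int) = cellD g0 (r : Int) (c : Int) ∨
    (r < R ∧ c < C ∧ cellD g0 (r : Int) (c : Int) = "." ∧ cellD g (r : Int) (c : Int) = "O"))

theorem shape_refl (g0 : List (List String)) (R C : Nat) : Shape g0 g0 R C :=
  ⟨rfl, fun _ => rfl, fun _ _ => Or.inl rfl⟩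

theorem cellD_int_eq (g : List (List String)) (r c : Int) :
    cellD g r c = cellD g (r.toNat : Int) (c.toNat : Int) := by
  have h1 : ((r.toNat : Int)).toNat = r.toNat := by omega
  have h2 : ((c.toNat : Int)).toNat = c.toNat := by omega
  unfold cellD
  rw [h1, h2]

theorem getD_set_self (g : List (List String)) (i : Nat) (row : List String)
    (hi : i < g.length) : (g.set i row).getD i [] = row := by
  rw [List.getD_eq_getElem _ _ (by simpa using hi), List.getElem_set_self (by simpa using hi)]

theorem getD_set_ne (g : List (List String)) (i j : Nat) (row : List String)
    (hij : j ≠ i) : (g.set i row).getD j [] = g.getD j [] := by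
  rw [List.getD_eq_getElem?_getD, List.getElem?_set_ne (by omega), ← List.getD_eq_getElem?_getD]

theorem getDs_set_self (row : List String) (j : Nat) (v : String)
    (hj : j < row.length) : (row.set j v).getD j "" = v := by
  rw [List.getD_eq_getElem _ _ (by simpa using hj), List.getElem_set_self (by simpa using hj)]

theorem getDs_set_ne (row : List String) (i j : Nat) (v : String)
    (hij : j ≠ i) : (row.set i v).getD j "" = row.getD j "" := by
  rw [List.getD_eq_getElem?_getD, List.getElem?_set_ne (by omega), ← List.getD_eq_getElem?_getD]

theorem cellD_setCell (g : List (List String)) (r c : Int)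
    (hr : r.toNat < g.length) (hc : c.toNat < (g.getD r.toNat []).length) (r' c' : Int) :
    cellD (setCell g r c) r' c' =
      if r'.toNat = r.toNat ∧ c'.toNat = c.toNat then "O" else cellD g r' c' := by
  unfold cellD setCell
  by_cases hrr : r'.toNat = r.toNat
  · rw [hrr, getD_set_self g r.toNat _ hr]
    by_cases hcc : c'.toNat = c.toNat
    · rw [if_pos ⟨rfl, hcc⟩, hcc, getDs_set_self _ _ _ hc]
    · rw [if_neg (by tauto), getDs_set_ne _ _ _ _ hcc]
  · rw [if_neg (by tauto), getD_set_ne g _ _ _ hrr]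

theorem setCell_length (g : List (List String)) (r c : Int) :
    (setCell g r c).length = g.length := by simp [setCell]

theorem setCell_rowlen (g : List (List String)) (r c : Int) (i : Nat) :
    ((setCell g r c).getD i []).length = (g.getD i []).length := by
  unfold setCell
  by_cases hi : i = r.toNat
  · by_cases hr : r.toNat < g.length
    · rw [hi, getD_set_self g r.toNat _ hr, List.length_set]
    · rw [List.set_eq_of_length_le (by omega)]
  · rw [getD_set_ne g _ _ _ hi]


theorem dot_in_range {g0 : List (List String)} {R C : Nat} {p : Int × Int}
    (hD : Dot g0 R C p) :
    p.1.toNat < g0.length ∧ p.2.toNat < (g0.getD p.1.toNat []).length := by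
  obtain ⟨_, _, _, _, hcell⟩ := hD
  have h1 : p.1.toNat < g0.length := by
    apply getD_ne_default (d := ([] : List String))
    intro hg
    rw [cellD] at hcell
    rw [hg] at hcell
    simp at hcell
  refine ⟨h1, getD_ne_default _ _ "" ?_⟩
  rw [show (g0.getD p.1.toNat []).getD p.2.toNat "" = cellD g0 p.1 p.2 from rfl, hcell]
  decide

theorem shape_cellD {g0 g : List (List String)} {R C : Nat} (hS : Shape g0 g R C)
    (r c : Int) (_h0r : 0 ≤ r) (_h0c : 0 ≤ c) :
    cellD g r c = cellD g0 r c ∨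
      (r.toNat < R ∧ c.toNat < C ∧ cellD g0 r c = "." ∧ cellD g r c = "O") := by
  have := hS.2.2 r.toNat c.toNat
  rwa [← cellD_int_eq, ← cellD_int_eq] at this

theorem shape_setCell {g0 g : List (List String)} {R C : Nat} (hS : Shape g0 g R C)
    {r c : Int} (hD : Dot g0 R C (r, c)) : Shape g0 (setCell g r c) R C := by
  obtain ⟨hr0, hc0⟩ := dot_in_range hD
  obtain ⟨hb1, hb2, hb3, hb4, hcell0⟩ := hD
  dsimp only at hb1 hb2 hb3 hb4 hcell0 hr0 hc0
  have hrg : r.toNat < g.length := by rw [hS.1]; exact hr0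
  have hcg : c.toNat < (g.getD r.toNat []).length := by rw [hS.2.1]; exact hc0
  refine ⟨by rw [setCell_length, hS.1], fun i => by rw [setCell_rowlen, hS.2.1], fun a b => ?_⟩
  rw [cellD_setCell g r c hrg hcg]
  by_cases hab : (a : Int).toNat = r.toNat ∧ (b : Int).toNat = c.toNat
  · rw [if_pos hab]
    right
    obtain ⟨ha, hb⟩ := hab
    simp only [Int.toNat_natCast] at ha hb
    subst ha; subst hb
    refine ⟨by omega, by omega, ?_, rfl⟩
    rw [← cellD_int_eq]
    exact hcell0
  · rw [if_neg hab]
    exact hS.2.2 a b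

theorem mk_setCell {g0 g : List (List String)} {R C : Nat} (hS : Shape g0 g R C)
    {r c : Int} (hD : Dot g0 R C (r, c)) (q : Int × Int) :
    Mk g0 (setCell g r c) R C q ↔ Mk g0 g R C q ∨ q = (r, c) := by
  obtain ⟨hr0, hc0⟩ := dot_in_range hD
  have hrg : r.toNat < g.length := by rw [hS.1]; exact hr0
  have hcg : c.toNat < (g.getD r.toNat []).length := by rw [hS.2.1]; exact hc0
  unfold Mk
  rw [cellD_setCell g r c hrg hcg]
  by_cases hq : q.1.toNat = r.toNat ∧ q.2.toNat = c.toNat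
  · rw [if_pos hq]
    constructor
    · rintro ⟨hDq, -⟩
      right
      have := hD.1; have := hD.2.1; have := hD.2.2.1
      have := hDq.1; have := hDq.2.1; have := hDq.2.2.1
      obtain ⟨q1, q2⟩ := q
      simp only at *
      ext <;> simp <;> omega
    · rintro (⟨hDq, hO⟩ | rfl)
      · refine ⟨hDq, rfl⟩
      · exact ⟨hD, rfl⟩
  · rw [if_neg hq]
    constructor
    · rintro ⟨hDq, hO⟩
      exact Or.inl ⟨hDq, hO⟩
    · rintro (⟨hDq, hO⟩ | rfl)
      · exact ⟨hDq, hO⟩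
      · exact absurd ⟨rfl, rfl⟩ hq

theorem RA_mem_congr {D : Int × Int → Prop} {S S' : List (Int × Int)}
    (h : ∀ x, x ∈ S ↔ x ∈ S') (q : Int × Int) : RA D S q ↔ RA D S' q := by
  unfold RA
  constructor
  · rintro ⟨p, hp, hr⟩; exact ⟨p, (h p).mp hp, hr⟩
  · rintro ⟨p, hp, hr⟩; exact ⟨p, (h p).mpr hp, hr⟩


theorem notD_of_shape {g0 g : List (List String)} {R C : Nat} (hS : Shape g0 g R C)
    {p : Int × Int}
    (h : ¬(0 ≤ p.1 ∧ p.1 < (R : Int)) ∨ ¬(0 ≤ p.2 ∧ p.2 < (C : Int)) ∨ cellD g p.1 p.2 ≠ ".") :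
    ¬ (Dot g0 R C p ∧ ¬ Mk g0 g R C p) := by
  rintro ⟨hD, hM⟩
  obtain ⟨h1, h2, h3, h4, h5⟩ := hD
  rcases h with h | h | h
  · exact h ⟨h1, h2⟩
  · exact h ⟨h3, h4⟩
  · rcases shape_cellD hS p.1 p.2 h1 h3 with he | ⟨_, _, _, hO⟩
    · rw [he] at h; exact h h5
    · exact hM ⟨⟨h1, h2, h3, h4, h5⟩, hO⟩

theorem dot_of_guard {g0 g : List (List String)} {R C : Nat} (hS : Shape g0 g R C)
    {r c : Int} (hb1 : 0 ≤ r) (hb2 : r < (R : Int)) (hb3 : 0 ≤ c) (hb4 : c < (C : Int))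
    (hcell : cellD g r c = ".") : Dot g0 R C (r, c) := by
  rcases shape_cellD hS r c hb1 hb3 with he | ⟨_, _, _, hO⟩
  · exact ⟨hb1, hb2, hb3, hb4, by dsimp only; rw [← he]; exact hcell⟩
  · rw [hcell] at hO; simp at hO

theorem floodLoop_char (g0 : List (List String)) (R C : Nat) :
    ∀ (g : List (List String)) (stack : List (Int × Int)), Shape g0 g R C →
    Shape g0 (floodLoop R C g stack) R C ∧
    (∀ q, Mk g0 (floodLoop R C g stack) R C q ↔
      Mk g0 g R C q ∨ RA (fun x => Dot g0 R C x ∧ ¬ Mk g0 g R C x) stack q) := by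
  intro g stack
  induction g, stack using floodLoop.induct R C with
  | case1 g => 
    intro hS
    refine ⟨by rw [floodLoop]; exact hS, fun q => ?_⟩
    rw [floodLoop]
    simp [RA]
  | case2 g row col rest h ih =>
    intro hS
    obtain ⟨ihS, ihMk⟩ := ih hS
    rw [floodLoop, dif_pos h]
    refine ⟨ihS, fun q => ?_⟩
    rw [ihMk q, RA_cons_of_notD (notD_of_shape hS h)]
  | case3 g row col rest h ih =>
    intro hS
    push Not at h
    obtain ⟨hb12, hb34, hcell⟩ := h
    have hD : Dot g0 R C (row, col) := dot_of_guard hS hb12.1 hb12.2 hb34.1 hb34.2 hcell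
    have hS' : Shape g0 (setCell g row col) R C := shape_setCell hS hD
    obtain ⟨ihS, ihMk⟩ := ih hS'
    rw [floodLoop, dif_neg (by push Not; exact ⟨hb12, hb34, hcell⟩)]
    refine ⟨ihS, fun q => ?_⟩
    rw [ihMk q]
    have hMk' := mk_setCell hS hD
    have hnotMk : ¬ Mk g0 g R C (row, col) := by
      rintro ⟨-, hO⟩
      rw [hcell] at hO
      exact absurd hO (by decide)
    -- rewrite avoided-set: Dot ∧ ¬Mk(setCell) ↔ (Dot ∧ ¬Mk g) ∧ ≠ (row,col)
    have hDiff : ∀ x, (Dot g0 R C x ∧ ¬ Mk g0 (setCell g row col) R C x) ↔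
        ((fun y => (Dot g0 R C y ∧ ¬ Mk g0 g R C y) ∧ y ≠ (row, col)) x) := by
      intro x
      rw [hMk' x]
      tauto
    have hstack : ∀ x, x ∈ ((row, col + 1) :: (row, col - 1) :: (row + 1, col) :: (row - 1, col) :: rest) ↔
        x ∈ (nbrsOf (row, col) ++ rest) := by
      intro x
      simp [nbrsOf]
      tauto
    rw [RA_congr hDiff, RA_mem_congr (fun x => (hstack x))]
    rw [hMk' q]
    have := mark_step (D := fun y => Dot g0 R C y ∧ ¬ Mk g0 g R C y) ⟨hD, hnotMk⟩ rest q
    tauto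


theorem reach_congr {D D' : Int × Int → Prop} (hDD : ∀ x, D x ↔ D' x) {s q : Int × Int} :
    Reach D s q ↔ Reach D' s q := by
  unfold Reach
  constructor
  · rintro ⟨n, hr⟩; exact ⟨n, (reachN_congr hDD).mp hr⟩
  · rintro ⟨n, hr⟩; exact ⟨n, (reachN_congr hDD).mpr hr⟩

theorem RA_closed {D : Int × Int → Prop} {S : List (Int × Int)} :
    ∀ a b, RA D S a → Adj a b → D b → RA D S b := by
  rintro a b ⟨p, hp, n, hr⟩ hA hD
  exact ⟨p, hp, n + 1, reachN_snoc hr hA hD⟩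

def seedStep (R C : Nat) (g : List (List String)) (s : Int × Int) : List (List String) :=
  if cellD g s.1 s.2 = "." then flood_fill R C g s.1 s.2 else g

theorem seedStep_char {g0 : List (List String)} {R C : Nat} {g : List (List String)}
    (s : Int × Int) (hS : Shape g0 g R C) :
    Shape g0 (seedStep R C g s) R C ∧
    (∀ q, Mk g0 (seedStep R C g s) R C q ↔
      Mk g0 g R C q ∨ Reach (fun x => Dot g0 R C x ∧ ¬ Mk g0 g R C x) s q) := by
  unfold seedStep
  by_cases hcell : cellD g s.1 s.2 = "."
  · rw [if_pos hcell]
    rw [flood_fill, if_neg (by simpa using hcell)]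
    obtain ⟨hSf, hMkf⟩ := floodLoop_char g0 R C g [(s.1, s.2)] hS
    refine ⟨hSf, fun q => ?_⟩
    rw [hMkf q]
    unfold RA
    simp
  · rw [if_neg hcell]
    refine ⟨hS, fun q => ?_⟩
    constructor
    · exact Or.inl
    · rintro (h | ⟨n, hr⟩)
      · exact h
      · exact absurd (reachN_src hr) (by
          have := notD_of_shape hS (p := s) (Or.inr (Or.inr hcell))
          simpa using this)

theorem foldSeeds_char {g0 : List (List String)} {R C : Nat} :
    ∀ (L : List (Int × Int)) (g : List (List String)) (S : List (Int × Int)),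
    Shape g0 g R C → (∀ q, Mk g0 g R C q ↔ RA (Dot g0 R C) S q) →
    Shape g0 (L.foldl (seedStep R C) g) R C ∧
    (∀ q, Mk g0 (L.foldl (seedStep R C) g) R C q ↔ RA (Dot g0 R C) (S ++ L) q) := by
  intro L
  induction L with
  | nil => intro g S hS hM; exact ⟨hS, fun q => by rw [List.foldl_nil] at *; rw [List.append_nil]; exact hM q⟩
  | cons s L ih =>
    intro g S hS hM
    obtain ⟨hS1, hM1⟩ := seedStep_char (g0 := g0) (R := R) (C := C) (g := g) s hS
    have hM1' : ∀ q, Mk g0 (seedStep R C g s) R C q ↔ RA (Dot g0 R C) (S ++ [s]) q := by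
      intro q
      rw [hM1 q, hM q, RA_append_singleton]
      have hcongr : ∀ x, (Dot g0 R C x ∧ ¬ Mk g0 g R C x) ↔
          (Dot g0 R C x ∧ ¬ RA (Dot g0 R C) S x) := by
        intro x
        rw [hM x]
      rw [reach_congr hcongr]
      exact absorb (RA_closed) s q
    have := ih (seedStep R C g s) (S ++ [s]) hS1 hM1'
    simpa using this

theorem foldl_double {α : Type} (step : α → (Int × Int) → α) (f1 f2 : Nat → Int × Int) :
    ∀ (L : List Nat) (g : α), L.foldl (fun g r => step (step g (f1 r)) (f2 r)) g
      = (L.flatMap (fun r => [f1 r, f2 r])).foldl step g := by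
  intro L
  induction L with
  | nil => intro g; rfl
  | cons r L ih => intro g; simp only [List.foldl_cons, List.flatMap_cons, List.foldl_append,
      List.foldl_cons, List.foldl_nil, ih]


theorem mem_seedsFold (grid : List (List String)) (R C : Nat) (cs : Nat → List Int)
    (pt : Nat → Int → Int × Int) :
    ∀ (L : List Nat) (s0 : PySem.Set (Int × Int)) (q : Int × Int),
    (q ∈ L.foldl (fun s r => (cs r).foldl
        (fun s c => if dotB grid R C (pt r c) then PySem.Set.add s (pt r c) else s) s) s0) ↔
    (q ∈ s0 ∨ ∃ r ∈ L, ∃ c ∈ cs r, q = pt r c ∧ dotB grid R C q = true) := by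
  have inner : ∀ (r : Nat) (cl : List Int) (s0 : PySem.Set (Int × Int)) (q : Int × Int),
      (q ∈ cl.foldl (fun s c => if dotB grid R C (pt r c) then PySem.Set.add s (pt r c) else s) s0) ↔
      (q ∈ s0 ∨ ∃ c ∈ cl, q = pt r c ∧ dotB grid R C q = true) := by
    intro r cl
    induction cl with
    | nil => simp
    | cons c cl ih =>
      intro s0 q
      rw [List.foldl_cons]
      by_cases hd : dotB grid R C (pt r c) = true
      · rw [if_pos hd, ih]
        rw [PySem.Set.mem_add]
        constructor
        · rintro ((h | rfl) | h)
          · exact Or.inl h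
          · exact Or.inr ⟨c, List.mem_cons_self, rfl, hd⟩
          · obtain ⟨c', hc', he, hb⟩ := h
            exact Or.inr ⟨c', List.mem_cons_of_mem _ hc', he, hb⟩
        · rintro (h | ⟨c', hc', he, hb⟩)
          · exact Or.inl (Or.inl h)
          · rcases List.mem_cons.mp hc' with rfl | hc'
            · exact Or.inl (Or.inr he)
            · exact Or.inr ⟨c', hc', he, hb⟩
      · rw [if_neg hd, ih]
        constructor
        · rintro (h | ⟨c', hc', he, hb⟩)
          · exact Or.inl h
          · exact Or.inr ⟨c', List.mem_cons_of_mem _ hc', he, hb⟩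
        · rintro (h | ⟨c', hc', he, hb⟩)
          · exact Or.inl h
          · rcases List.mem_cons.mp hc' with rfl | hc'
            · rw [he] at hb
              exact absurd hb hd
            · exact Or.inr ⟨c', hc', he, hb⟩
  intro L
  induction L with
  | nil => simp
  | cons r L ih =>
    intro s0 q
    rw [List.foldl_cons, ih, inner]
    constructor
    · rintro ((h | ⟨c, hc, he, hb⟩) | ⟨r', hr', h⟩)
      · exact Or.inl h
      · exact Or.inr ⟨r, List.mem_cons_self, c, hc, he, hb⟩
      · exact Or.inr ⟨r', List.mem_cons_of_mem _ hr', h⟩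
    · rintro (h | ⟨r', hr', h⟩)
      · exact Or.inl (Or.inl h)
      · rcases List.mem_cons.mp hr' with rfl | hr'
        · exact Or.inl (Or.inr h)
        · exact Or.inr ⟨r', hr', h⟩

theorem markFold_char {g0 : List (List String)} {R C : Nat} :
    ∀ (l : List (Int × Int)) (g : List (List String)), Shape g0 g R C →
    (∀ p ∈ l, Dot g0 R C p) →
    Shape g0 (l.foldl (fun g p => setCell g p.1 p.2) g) R C ∧
    (∀ q, Mk g0 (l.foldl (fun g p => setCell g p.1 p.2) g) R C q ↔ Mk g0 g R C q ∨ q ∈ l) := by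
  intro l
  induction l with
  | nil => intro g hS _; exact ⟨hS, fun q => by simp⟩
  | cons p l ih =>
    intro g hS hdot
    have hDp : Dot g0 R C (p.1, p.2) := hdot p List.mem_cons_self
    have hS' := shape_setCell hS hDp
    obtain ⟨ihS, ihMk⟩ := ih (setCell g p.1 p.2) hS' (fun x hx => hdot x (List.mem_cons_of_mem _ hx))
    refine ⟨ihS, fun q => ?_⟩
    rw [List.foldl_cons] at *
    rw [ihMk q, mk_setCell hS hDp q]
    simp only [List.mem_cons]
    constructor
    · rintro ((h | h) | h)
      · exact Or.inl h
      · exact Or.inr (Or.inl h)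
      · exact Or.inr (Or.inr h)
    · rintro (h | h | h)
      · exact Or.inl (Or.inl h)
      · exact Or.inl (Or.inr h)
      · exact Or.inr h

theorem shape_ext {g0 a b : List (List String)} {R C : Nat}
    (hSa : Shape g0 a R C) (hSb : Shape g0 b R C)
    (hM : ∀ q, Mk g0 a R C q ↔ Mk g0 b R C q) : a = b := by
  have hlen : a.length = b.length := by rw [hSa.1, hSb.1]
  apply List.ext_getElem hlen
  intro i hia hib
  have hrl : a[i].length = b[i].length := by
    have h1 := hSa.2.1 i
    have h2 := hSb.2.1 i
    rw [List.getD_eq_getElem a [] hia] at h1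
    rw [List.getD_eq_getElem b [] hib] at h2
    rw [h1, h2]
  apply List.ext_getElem hrl
  intro j hja hjb
  have hca : a[i][j] = cellD a (i : Int) (j : Int) := by
    rw [cellD]
    simp only [Int.toNat_natCast]
    rw [List.getD_eq_getElem a [] hia, List.getD_eq_getElem _ _ hja]
  have hcb : b[i][j] = cellD b (i : Int) (j : Int) := by
    rw [cellD]
    simp only [Int.toNat_natCast]
    rw [List.getD_eq_getElem b [] hib, List.getD_eq_getElem _ _ hjb]
  rw [hca, hcb]
  rcases hSa.2.2 i j with ha | ⟨hiR, hjC, h0, hOa⟩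
  · rcases hSb.2.2 i j with hb | ⟨hiR, hjC, h0, hOb⟩
    · rw [ha, hb]
    · -- b is marked at (i,j); then Mk b → Mk a → a is "O" there
      have hDot : Dot g0 R C ((i : Int), (j : Int)) := by
        refine ⟨by omega, by simp; omega, by omega, by simp; omega, h0⟩
      have hMkb : Mk g0 b R C ((i : Int), (j : Int)) := ⟨hDot, hOb⟩
      have h2 : cellD a (i : Int) (j : Int) = "O" := ((hM _).mpr hMkb).2
      rw [ha, h0] at h2
      exact absurd h2 (by decide)
  · have hDot : Dot g0 R C ((i : Int), (j : Int)) := by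
      refine ⟨by omega, by simp; omega, by omega, by simp; omega, h0⟩
    have hMka : Mk g0 a R C ((i : Int), (j : Int)) := ⟨hDot, hOa⟩
    have h2 : cellD b (i : Int) (j : Int) = "O" := ((hM _).mp hMka).2
    rw [hOa, h2]


theorem mem_newFrontier {grid : List (List String)} {R C : Nat}
    {o f : PySem.Set (Int × Int)} {q : Int × Int} :
    q ∈ newFrontier grid R C o f ↔
    (∃ p ∈ f, Adj p q) ∧ dotB grid R C q = true ∧ q ∉ o := by
  unfold newFrontier
  rw [PySem.Set.mem_ofList, List.mem_filter]
  constructor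
  · rintro ⟨hmem, hpred⟩
    simp only [Bool.and_eq_true, Bool.not_eq_true'] at hpred
    obtain ⟨p, hp, hnb⟩ := List.mem_flatMap.mp hmem
    refine ⟨⟨p, hp, hnb⟩, hpred.1, fun hin => ?_⟩
    rw [(PySem.Set.contains_iff o q).mpr hin] at hpred
    simp at hpred
  · rintro ⟨⟨p, hp, hnb⟩, hd, hno⟩
    refine ⟨List.mem_flatMap.mpr ⟨p, hp, hnb⟩, ?_⟩
    simp only [Bool.and_eq_true, Bool.not_eq_true']
    refine ⟨hd, ?_⟩
    rcases hco : PySem.Set.contains o q with _ | _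
    · rfl
    · exact absurd ((PySem.Set.contains_iff o q).mp hco) hno

theorem bfs_mono (grid : List (List String)) (R C : Nat) :
    ∀ (o f : PySem.Set (Int × Int)) (x : Int × Int), x ∈ o → x ∈ bfsLoop grid R C o f := by
  intro o f
  induction o, f using bfsLoop.induct grid R C with
  | case1 o =>
    intro x hx
    rw [bfsLoop, dif_pos rfl]
    exact hx
  | case2 o f hf ih =>
    intro x hx
    rw [bfsLoop, dif_neg hf]
    exact ih x ((PySem.Set.mem_union _ _ _).mpr (Or.inl hx))

theorem bfs_sound (grid : List (List String)) (R C : Nat) (M : Int × Int → Prop)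
    (hcl : ∀ a b, M a → Adj a b → Dot grid R C b → M b) :
    ∀ (o f : PySem.Set (Int × Int)), (∀ x ∈ o, M x) → (∀ x ∈ f, x ∈ o) →
    ∀ x ∈ bfsLoop grid R C o f, M x := by
  intro o f
  induction o, f using bfsLoop.induct grid R C with
  | case1 o =>
    intro ho _ x hx
    rw [bfsLoop, dif_pos rfl] at hx
    exact ho x hx
  | case2 o f hf ih =>
    intro ho hfo x hx
    rw [bfsLoop, dif_neg hf] at hx
    have hnf : ∀ y ∈ newFrontier grid R C o f, M y := by
      intro y hy
      obtain ⟨⟨p, hp, hA⟩, hd, -⟩ := mem_newFrontier.mp hy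
      exact hcl p y (ho p (hfo p hp)) hA ((dotB_iff grid R C y).mp hd)
    refine ih ?_ ?_ x hx
    · intro y hy
      rcases (PySem.Set.mem_union _ _ _).mp hy with h | h
      · exact ho y h
      · exact hnf y h
    · intro y hy
      exact (PySem.Set.mem_union _ _ _).mpr (Or.inr hy)

theorem bfs_closed (grid : List (List String)) (R C : Nat) :
    ∀ (o f : PySem.Set (Int × Int)), (∀ x ∈ f, x ∈ o) →
    (∀ p ∈ o, p ∉ f → ∀ q, Adj p q → Dot grid R C q → q ∈ o) →
    ∀ p ∈ bfsLoop grid R C o f, ∀ q, Adj p q → Dot grid R C q →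
      q ∈ bfsLoop grid R C o f := by
  intro o f
  induction o, f using bfsLoop.induct grid R C with
  | case1 o =>
    intro hfo hCL p hp q hA hD
    rw [bfsLoop, dif_pos rfl] at hp ⊢
    exact hCL p hp (by simp) q hA hD
  | case2 o f hf ih =>
    intro hfo hCL p hp q hA hD
    rw [bfsLoop, dif_neg hf] at hp ⊢
    refine ih ?_ ?_ p hp q hA hD
    · intro y hy
      exact (PySem.Set.mem_union _ _ _).mpr (Or.inr hy)
    · intro y hy hynf z hAz hDz
      rcases (PySem.Set.mem_union _ _ _).mp hy with hyo | hynf'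
      · by_cases hyf : y ∈ f
        · by_cases hzo : z ∈ o
          · exact (PySem.Set.mem_union _ _ _).mpr (Or.inl hzo)
          · refine (PySem.Set.mem_union _ _ _).mpr (Or.inr ?_)
            exact mem_newFrontier.mpr ⟨⟨y, hyf, hAz⟩, (dotB_iff grid R C z).mpr hDz, hzo⟩
        · exact (PySem.Set.mem_union _ _ _).mpr (Or.inl (hCL y hyo hyf z hAz hDz))
      · exact absurd hynf' hynf


theorem mk_init (grid : List (List String)) (R C : Nat) (q : Int × Int) :
    Mk grid grid R C q ↔ RA (Dot grid R C) [] q := by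
  unfold Mk RA
  simp only [List.not_mem_nil, false_and, exists_false, iff_false, not_and]
  rintro ⟨-, -, -, -, h5⟩ hO
  rw [h5] at hO
  exact absurd hO (by decide)

theorem dot_of_RA {grid : List (List String)} {R C : Nat} {S : List (Int × Int)}
    {q : Int × Int} (h : RA (Dot grid R C) S q) : Dot grid R C q := by
  obtain ⟨s, hs, n, hr⟩ := h
  exact reachN_tgt hr

theorem doRange_eq_map (n : Nat) :
    (do let a ← List.range n; pure ((a : Nat) : Int)) = (List.range n).map (fun (a : Nat) => (a : Int)) := by
  exact Eq.symm List.map_eq_flatMap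

theorem ports_eq (grid : List (List String)) :
    count_inside_points grid = count_inside_points_alt grid := by
  have hA : count_inside_points grid =
      (↑grid.length * ↑(grid.headD []).length : Int) -
      (List.map (fun row => ((List.count "O" row : Nat) : Int))
        (List.foldl (fun g col => seedStep grid.length (grid.headD []).length
            (seedStep grid.length (grid.headD []).length g (0, col))
            ((grid.length : Int) - 1, col))
          (List.foldl (fun g row => seedStep grid.length (grid.headD []).length
              (seedStep grid.length (grid.headD []).length g (row, 0))
              (row, ((grid.headD []).length : Int) - 1))
            grid
            (do let a ← List.range grid.length; pure ((a : Nat) : Int)))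
          (do let a ← List.range (grid.headD []).length; pure ((a : Nat) : Int)))).sum := rfl
  have hB : count_inside_points_alt grid =
      (↑grid.length * ↑(grid.headD []).length : Int) -
      (List.map (fun row => ((List.count "O" row : Nat) : Int))
        (List.foldl (fun g p => setCell g p.1 p.2) grid
          (bfsLoop grid grid.length (grid.headD []).length
            (List.foldl (fun s c => List.foldl (fun s r =>
                if dotB grid grid.length (grid.headD []).length (r, c) = true
                then PySem.Set.add s (r, c) else s) s [0, (grid.length : Int) - 1])
              (List.foldl (fun s r => List.foldl (fun s c =>
                  if dotB grid grid.length (grid.headD []).length (r, c) = true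
                  then PySem.Set.add s (r, c) else s) s [0, ((grid.headD []).length : Int) - 1])
                PySem.Set.empty
                (do let a ← List.range grid.length; pure ((a : Nat) : Int)))
              (do let a ← List.range (grid.headD []).length; pure ((a : Nat) : Int)))
            (List.foldl (fun s c => List.foldl (fun s r =>
                if dotB grid grid.length (grid.headD []).length (r, c) = true
                then PySem.Set.add s (r, c) else s) s [0, (grid.length : Int) - 1])
              (List.foldl (fun s r => List.foldl (fun s c =>
                  if dotB grid grid.length (grid.headD []).length (r, c) = true
                  then PySem.Set.add s (r, c) else s) s [0, ((grid.headD []).length : Int) - 1])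
                PySem.Set.empty
                (do let a ← List.range grid.length; pure ((a : Nat) : Int)))
              (do let a ← List.range (grid.headD []).length; pure ((a : Nat) : Int)))))).sum := rfl
  rw [hA, hB, doRange_eq_map, doRange_eq_map]
  simp only [List.foldl_map]
  rw [foldl_double (seedStep grid.length (grid.headD []).length)
        (fun r => ((r : Int), (0 : Int))) (fun r => ((r : Int), ((grid.headD []).length : Int) - 1))
        (List.range grid.length) grid,
      foldl_double (seedStep grid.length (grid.headD []).length)
        (fun c => ((0 : Int), (c : Int))) (fun c => (((grid.length : Int)) - 1, (c : Int)))
        (List.range (grid.headD []).length)]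
  set R := grid.length with hRdef
  set C := (grid.headD []).length with hCdef
  congr 1
  congr 1
  congr 1
  -- names for the seed structures
  have hmkself : ∀ q, ¬ Mk grid grid R C q := by
    intro q h
    rcases (mk_init grid R C q).mp h with ⟨p, hp, -⟩
    simp at hp
  -- A side characterisation
  obtain ⟨hSA1, hMA1⟩ := foldSeeds_char
    ((List.range R).flatMap (fun (r : Nat) => [((r : Int), (0 : Int)), ((r : Int), (C : Int) - 1)]))
    grid [] (shape_refl grid R C) (mk_init grid R C)
  rw [List.nil_append] at hMA1
  obtain ⟨hSA2, hMA2⟩ := foldSeeds_char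
    ((List.range C).flatMap (fun (c : Nat) => [((0 : Int), (c : Int)), ((R : Int) - 1, (c : Int))]))
    _ _ hSA1 hMA1
  -- B side: seed set membership
  have hm1 : ∀ q, q ∈ ((List.range R).foldl (fun x (y : Nat) => List.foldl
      (fun s c => if dotB grid R C ((y : Int), c) = true then PySem.Set.add s ((y : Int), c) else s)
      x [0, (C : Int) - 1]) PySem.Set.empty) ↔
      (q ∈ (PySem.Set.empty : PySem.Set (Int × Int)) ∨
        ∃ r ∈ List.range R, ∃ c ∈ [(0 : Int), (C : Int) - 1], q = ((r : Int), c) ∧ dotB grid R C q = true) :=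
    fun q => mem_seedsFold grid R C (fun _ => [(0 : Int), (C : Int) - 1])
      (fun r c => ((r : Int), c)) (List.range R) PySem.Set.empty q
  have hm2 : ∀ q, q ∈ ((List.range C).foldl (fun x (y : Nat) => List.foldl
      (fun s r => if dotB grid R C (r, (y : Int)) = true then PySem.Set.add s (r, (y : Int)) else s)
      x [0, (R : Int) - 1]) ((List.range R).foldl (fun x (y : Nat) => List.foldl
      (fun s c => if dotB grid R C ((y : Int), c) = true then PySem.Set.add s ((y : Int), c) else s)
      x [0, (C : Int) - 1]) PySem.Set.empty)) ↔
      ((q ∈ (PySem.Set.empty : PySem.Set (Int × Int)) ∨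
        ∃ r ∈ List.range R, ∃ c ∈ [(0 : Int), (C : Int) - 1], q = ((r : Int), c) ∧ dotB grid R C q = true) ∨
        ∃ c ∈ List.range C, ∃ r ∈ [(0 : Int), (R : Int) - 1], q = (r, (c : Int)) ∧ dotB grid R C q = true) := by
    intro q
    rw [← hm1 q]
    exact mem_seedsFold grid R C (fun _ => [(0 : Int), (R : Int) - 1])
      (fun c r => (r, (c : Int))) (List.range C) _ q
  -- membership in A's seed list vs B's seed set, for Dot cells
  have hmemAB : ∀ s, Dot grid R C s →
      ((s ∈ (List.range R).flatMap (fun (r : Nat) => [((r : Int), (0 : Int)), ((r : Int), (C : Int) - 1)]) ++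
          (List.range C).flatMap (fun (c : Nat) => [((0 : Int), (c : Int)), ((R : Int) - 1, (c : Int))])) ↔
        (s ∈ (List.range C).foldl (fun x (y : Nat) => List.foldl
          (fun s r => if dotB grid R C (r, (y : Int)) = true then PySem.Set.add s (r, (y : Int)) else s)
          x [0, (R : Int) - 1]) ((List.range R).foldl (fun x (y : Nat) => List.foldl
          (fun s c => if dotB grid R C ((y : Int), c) = true then PySem.Set.add s ((y : Int), c) else s)
          x [0, (C : Int) - 1]) PySem.Set.empty))) := by
    intro s hD
    rw [hm2 s]
    have hdb : dotB grid R C s = true := (dotB_iff grid R C s).mpr hD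
    simp only [List.mem_append, List.mem_flatMap, List.mem_range, List.mem_cons,
      List.not_mem_nil, or_false, PySem.Set.empty, false_or, hdb, and_true]
    constructor
    · rintro (⟨a, ha, h | h⟩ | ⟨a, ha, h | h⟩)
      · exact Or.inl ⟨a, ha, 0, Or.inl rfl, h⟩
      · exact Or.inl ⟨a, ha, (C : Int) - 1, Or.inr rfl, h⟩
      · exact Or.inr ⟨a, ha, 0, Or.inl rfl, h⟩
      · exact Or.inr ⟨a, ha, (R : Int) - 1, Or.inr rfl, h⟩
    · rintro (⟨r, hr, c, rfl | rfl, h⟩ | ⟨c, hc, r, rfl | rfl, h⟩)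
      · exact Or.inl ⟨r, hr, Or.inl h⟩
      · exact Or.inl ⟨r, hr, Or.inr h⟩
      · exact Or.inr ⟨c, hc, Or.inl h⟩
      · exact Or.inr ⟨c, hc, Or.inr h⟩
  -- B side: the BFS fixpoint is exactly the set of cells reachable from the seeds
  have hseedDot : ∀ x, x ∈ ((List.range C).foldl (fun x (y : Nat) => List.foldl
      (fun s r => if dotB grid R C (r, (y : Int)) = true then PySem.Set.add s (r, (y : Int)) else s)
      x [0, (R : Int) - 1]) ((List.range R).foldl (fun x (y : Nat) => List.foldl
      (fun s c => if dotB grid R C ((y : Int), c) = true then PySem.Set.add s ((y : Int), c) else s)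
      x [0, (C : Int) - 1]) PySem.Set.empty)) → Dot grid R C x := by
    intro x hx
    rcases (hm2 x).mp hx with (h | ⟨_, _, _, _, rfl, hdb⟩) | ⟨_, _, _, _, rfl, hdb⟩
    · simp [PySem.Set.empty] at h
    · exact (dotB_iff grid R C _).mp hdb
    · exact (dotB_iff grid R C _).mp hdb
  have hOsound : ∀ x ∈ bfsLoop grid R C ((List.range C).foldl (fun x (y : Nat) => List.foldl
      (fun s r => if dotB grid R C (r, (y : Int)) = true then PySem.Set.add s (r, (y : Int)) else s)
      x [0, (R : Int) - 1]) ((List.range R).foldl (fun x (y : Nat) => List.foldl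
      (fun s c => if dotB grid R C ((y : Int), c) = true then PySem.Set.add s ((y : Int), c) else s)
      x [0, (C : Int) - 1]) PySem.Set.empty))
      ((List.range C).foldl (fun x (y : Nat) => List.foldl
      (fun s r => if dotB grid R C (r, (y : Int)) = true then PySem.Set.add s (r, (y : Int)) else s)
      x [0, (R : Int) - 1]) ((List.range R).foldl (fun x (y : Nat) => List.foldl
      (fun s c => if dotB grid R C ((y : Int), c) = true then PySem.Set.add s ((y : Int), c) else s)
      x [0, (C : Int) - 1]) PySem.Set.empty)), RA (Dot grid R C) ((List.range C).foldl (fun x (y : Nat) => List.foldl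
      (fun s r => if dotB grid R C (r, (y : Int)) = true then PySem.Set.add s (r, (y : Int)) else s)
      x [0, (R : Int) - 1]) ((List.range R).foldl (fun x (y : Nat) => List.foldl
      (fun s c => if dotB grid R C ((y : Int), c) = true then PySem.Set.add s ((y : Int), c) else s)
      x [0, (C : Int) - 1]) PySem.Set.empty)) x :=
    bfs_sound grid R C _ RA_closed _ _
      (fun x hx => ⟨x, hx, 0, ReachN.refl x (hseedDot x hx)⟩) (fun x hx => hx)
  have hOclosed := bfs_closed grid R C ((List.range C).foldl (fun x (y : Nat) => List.foldl
      (fun s r => if dotB grid R C (r, (y : Int)) = true then PySem.Set.add s (r, (y : Int)) else s)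
      x [0, (R : Int) - 1]) ((List.range R).foldl (fun x (y : Nat) => List.foldl
      (fun s c => if dotB grid R C ((y : Int), c) = true then PySem.Set.add s ((y : Int), c) else s)
      x [0, (C : Int) - 1]) PySem.Set.empty)) ((List.range C).foldl (fun x (y : Nat) => List.foldl
      (fun s r => if dotB grid R C (r, (y : Int)) = true then PySem.Set.add s (r, (y : Int)) else s)
      x [0, (R : Int) - 1]) ((List.range R).foldl (fun x (y : Nat) => List.foldl
      (fun s c => if dotB grid R C ((y : Int), c) = true then PySem.Set.add s ((y : Int), c) else s)
      x [0, (C : Int) - 1]) PySem.Set.empty))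
      (fun x hx => hx) (fun p hp hpn => absurd hp hpn)
  have hOcomp : ∀ q, RA (Dot grid R C) ((List.range C).foldl (fun x (y : Nat) => List.foldl
      (fun s r => if dotB grid R C (r, (y : Int)) = true then PySem.Set.add s (r, (y : Int)) else s)
      x [0, (R : Int) - 1]) ((List.range R).foldl (fun x (y : Nat) => List.foldl
      (fun s c => if dotB grid R C ((y : Int), c) = true then PySem.Set.add s ((y : Int), c) else s)
      x [0, (C : Int) - 1]) PySem.Set.empty)) q →
      q ∈ bfsLoop grid R C ((List.range C).foldl (fun x (y : Nat) => List.foldl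
      (fun s r => if dotB grid R C (r, (y : Int)) = true then PySem.Set.add s (r, (y : Int)) else s)
      x [0, (R : Int) - 1]) ((List.range R).foldl (fun x (y : Nat) => List.foldl
      (fun s c => if dotB grid R C ((y : Int), c) = true then PySem.Set.add s ((y : Int), c) else s)
      x [0, (C : Int) - 1]) PySem.Set.empty)) ((List.range C).foldl (fun x (y : Nat) => List.foldl
      (fun s r => if dotB grid R C (r, (y : Int)) = true then PySem.Set.add s (r, (y : Int)) else s)
      x [0, (R : Int) - 1]) ((List.range R).foldl (fun x (y : Nat) => List.foldl
      (fun s c => if dotB grid R C ((y : Int), c) = true then PySem.Set.add s ((y : Int), c) else s)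
      x [0, (C : Int) - 1]) PySem.Set.empty)) := by
    rintro q ⟨p, hp, n, hr⟩
    exact reach_closed (M := fun z => z ∈ bfsLoop grid R C ((List.range C).foldl (fun x (y : Nat) => List.foldl
      (fun s r => if dotB grid R C (r, (y : Int)) = true then PySem.Set.add s (r, (y : Int)) else s)
      x [0, (R : Int) - 1]) ((List.range R).foldl (fun x (y : Nat) => List.foldl
      (fun s c => if dotB grid R C ((y : Int), c) = true then PySem.Set.add s ((y : Int), c) else s)
      x [0, (C : Int) - 1]) PySem.Set.empty)) ((List.range C).foldl (fun x (y : Nat) => List.foldl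
      (fun s r => if dotB grid R C (r, (y : Int)) = true then PySem.Set.add s (r, (y : Int)) else s)
      x [0, (R : Int) - 1]) ((List.range R).foldl (fun x (y : Nat) => List.foldl
      (fun s c => if dotB grid R C ((y : Int), c) = true then PySem.Set.add s ((y : Int), c) else s)
      x [0, (C : Int) - 1]) PySem.Set.empty)))
      (fun a b ha hA hD => hOclosed a ha b hA hD) hr (bfs_mono grid R C _ _ p hp)
  have hdotO : ∀ p ∈ bfsLoop grid R C ((List.range C).foldl (fun x (y : Nat) => List.foldl
      (fun s r => if dotB grid R C (r, (y : Int)) = true then PySem.Set.add s (r, (y : Int)) else s)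
      x [0, (R : Int) - 1]) ((List.range R).foldl (fun x (y : Nat) => List.foldl
      (fun s c => if dotB grid R C ((y : Int), c) = true then PySem.Set.add s ((y : Int), c) else s)
      x [0, (C : Int) - 1]) PySem.Set.empty)) ((List.range C).foldl (fun x (y : Nat) => List.foldl
      (fun s r => if dotB grid R C (r, (y : Int)) = true then PySem.Set.add s (r, (y : Int)) else s)
      x [0, (R : Int) - 1]) ((List.range R).foldl (fun x (y : Nat) => List.foldl
      (fun s c => if dotB grid R C ((y : Int), c) = true then PySem.Set.add s ((y : Int), c) else s)
      x [0, (C : Int) - 1]) PySem.Set.empty)), Dot grid R C p :=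
    fun p hp => dot_of_RA (hOsound p hp)
  obtain ⟨hSB2, hMB⟩ := markFold_char (bfsLoop grid R C ((List.range C).foldl (fun x (y : Nat) => List.foldl
      (fun s r => if dotB grid R C (r, (y : Int)) = true then PySem.Set.add s (r, (y : Int)) else s)
      x [0, (R : Int) - 1]) ((List.range R).foldl (fun x (y : Nat) => List.foldl
      (fun s c => if dotB grid R C ((y : Int), c) = true then PySem.Set.add s ((y : Int), c) else s)
      x [0, (C : Int) - 1]) PySem.Set.empty)) ((List.range C).foldl (fun x (y : Nat) => List.foldl
      (fun s r => if dotB grid R C (r, (y : Int)) = true then PySem.Set.add s (r, (y : Int)) else s)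
      x [0, (R : Int) - 1]) ((List.range R).foldl (fun x (y : Nat) => List.foldl
      (fun s c => if dotB grid R C ((y : Int), c) = true then PySem.Set.add s ((y : Int), c) else s)
      x [0, (C : Int) - 1]) PySem.Set.empty))) grid
    (shape_refl grid R C) hdotO
  -- conclude: the two marked grids are equal
  exact shape_ext hSA2 hSB2 (fun q => by
    rw [hMA2 q, hMB q]
    constructor
    · intro hRA
      rcases hRA with ⟨sd, hsd, n, hr⟩
      refine Or.inr (hOcomp q ⟨sd, ?_, n, hr⟩)
      exact (hmemAB sd (reachN_src hr)).mp hsd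
    · rintro (hself | hO)
      · exact absurd hself (hmkself q)
      · rcases hOsound q hO with ⟨sd, hsd, n, hr⟩
        exact ⟨sd, (hmemAB sd (reachN_src hr)).mpr hsd, n, hr⟩)

-- ===== VERDICT (by name: the statement is the Claim_ definition above) =====
theorem count_inside_points_spec : Claim_equal_count_inside_points := by
  intro grid _ _
  unfold Spec_count_inside_points
  exact ports_eq grid
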